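-- pv_equiv track=rewrite | github.com/Whippsie/Bio_TP3 | TP3Q1.py | buildKmer
-- ===== SOURCE A (Python) =====
-- def buildKmer(k, inputUser):
--     kmerList = []
--     kmerPos = []
--     if k > 0:
--         # Parcourt la sequence
--         for i in range(len(inputUser) - k + 1):
--             temp = ""
--             # On ajoute les caracteres aux positions jusqu'a k
--             for j in range(k):
--                 temp += inputUser[i + j]
--             # On ajoute chaque kmer individuellement
--             if temp not in kmerList:
--                 kmerList.append(temp)
--                 kmerPos.append(i)
--     return kmerList, kmerPos
-- ===== SOURCE B (Python) =====
-- def buildKmer(k, inputUser):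
--     seen = {}
--     if k > 0:
--         for i in range(len(inputUser) - k + 1):
--             seen.setdefault(inputUser[i:i+k], i)
--     return list(seen.keys()), list(seen.values())
-- ===== Notes on version B (the rewrite author's own statement) =====
-- stated objective: faster
-- what changed: Replaces the char-by-char inner loop plus 'not in list' membership scan and two parallel append lists with a single order-preserving dict of kmer->first index built via slices and setdefault, extracting keys/values once at the end.
import Mathlib
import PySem

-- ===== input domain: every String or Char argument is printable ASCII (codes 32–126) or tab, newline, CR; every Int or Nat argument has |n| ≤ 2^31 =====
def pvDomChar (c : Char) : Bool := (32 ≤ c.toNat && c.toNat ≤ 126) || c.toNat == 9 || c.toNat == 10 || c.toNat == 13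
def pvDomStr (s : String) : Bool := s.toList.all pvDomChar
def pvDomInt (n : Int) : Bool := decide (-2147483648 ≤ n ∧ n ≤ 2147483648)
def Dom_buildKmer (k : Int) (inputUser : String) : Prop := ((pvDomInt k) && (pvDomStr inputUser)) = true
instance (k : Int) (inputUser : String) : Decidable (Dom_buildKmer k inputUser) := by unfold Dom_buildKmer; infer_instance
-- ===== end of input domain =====

-- B: one order-preserving dict kmer -> first index built with slices and setdefault, instead of A's
-- char-by-char window build, list-membership scan and two parallel append lists.

-- ===== PORT A =====
-- Indices i+j are always in range (0 ≤ i ≤ len-k, 0 ≤ j < k), so pyGetD's default is never used.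
def buildKmer (k : Int) (inputUser : String) : List String × List Int :=
  let cs := inputUser.toList
  if k > 0 then
    (PySem.List.pyRange 0 (PySem.Str.len inputUser - k + 1) 1).foldl
      (fun st i =>
        let temp : List Char :=
          (PySem.List.pyRange 0 k 1).foldl
            (fun temp j => temp ++ [PySem.List.pyGetD cs (i + j) ' ']) []
        let t := String.ofList temp
        if t ∈ st.1 then st else (st.1 ++ [t], st.2 ++ [i]))
      ([], [])
  else ([], [])

-- ===== PORT B =====
def buildKmer_alt (k : Int) (inputUser : String) : List String × List Int :=
  let cs := inputUser.toList
  let seen : PySem.Dict String Int :=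
    if k > 0 then
      (PySem.List.pyRange 0 (PySem.Str.len inputUser - k + 1) 1).foldl
        (fun d i => d.setdefault (String.ofList (PySem.List.slice cs (some i) (some (i + k)))) i)
        PySem.Dict.empty
    else PySem.Dict.empty
  (seen.keys, seen.values)

-- ===== PRECONDITION & SPEC =====
def Spec_buildKmer (k : Int) (inputUser : String) (out : List String × List Int) : Prop := out = buildKmer_alt k inputUser
instance (k : Int) (inputUser : String) (out : List String × List Int) : Decidable (Spec_buildKmer k inputUser out) := by unfold Spec_buildKmer; infer_instance

-- ===== CLAIM (what is proved, stated in full; the proofs are below) =====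
def Claim_equal_buildKmer : Prop := ∀ (k : Int) (inputUser : String), Dom_buildKmer k inputUser → Spec_buildKmer k inputUser (buildKmer k inputUser)

-- ===== LEMMAS AND PROOFS =====

lemma window_eq (cs : List Char) (i k : Int) (h0 : 0 ≤ i) (hk : 0 < k)
    (hle : i + k ≤ (cs.length : Int)) :
    (PySem.List.pyRange 0 k 1).foldl
      (fun temp j => temp ++ [PySem.List.pyGetD cs (i + j) ' ']) []
    = PySem.List.slice cs (some i) (some (i + k)) := by
  rw [PySem.List.foldl_append_singleton_eq_map, List.nil_append,
      PySem.List.slice_toNat cs h0 (by omega), PySem.List.pyRange_one, List.map_map]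
  have hkk : i.toNat + k.toNat ≤ cs.length := by omega
  apply List.ext_getElem
  · simp; omega
  · intro n h1 h2
    have hn : n < k.toNat := by simpa using h1
    simp only [List.getElem_map, List.getElem_range, Function.comp_apply]
    rw [PySem.List.pyGetD_eq_getElem cs (i := i + (0 + (n : Int))) ' ' (by omega) (by omega)]
    rw [List.getElem_take, List.getElem_drop]
    congr 1
    omega


lemma sim' (cs : List Char) (k : Int) (hk : 0 < k) (l : List Int)
    (hmem : ∀ i ∈ l, 0 ≤ i ∧ i + k ≤ (cs.length : Int))
    (st : List String × List Int) (d : PySem.Dict String Int)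
    (hitems : d.items = st.1.zip st.2) (hlen : st.1.length = st.2.length) :
    (l.foldl (fun d i =>
        d.setdefault (String.ofList (PySem.List.slice cs (some i) (some (i + k)))) i) d).items
      = (l.foldl (fun st i =>
          let temp : List Char :=
            (PySem.List.pyRange 0 k 1).foldl
              (fun temp j => temp ++ [PySem.List.pyGetD cs (i + j) ' ']) []
          let t := String.ofList temp
          if t ∈ st.1 then st else (st.1 ++ [t], st.2 ++ [i])) st).1.zip
        (l.foldl (fun st i =>
          let temp : List Char :=
            (PySem.List.pyRange 0 k 1).foldl
              (fun temp j => temp ++ [PySem.List.pyGetD cs (i + j) ' ']) []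
          let t := String.ofList temp
          if t ∈ st.1 then st else (st.1 ++ [t], st.2 ++ [i])) st).2
    ∧ (l.foldl (fun st i =>
          let temp : List Char :=
            (PySem.List.pyRange 0 k 1).foldl
              (fun temp j => temp ++ [PySem.List.pyGetD cs (i + j) ' ']) []
          let t := String.ofList temp
          if t ∈ st.1 then st else (st.1 ++ [t], st.2 ++ [i])) st).1.length
      = (l.foldl (fun st i =>
          let temp : List Char :=
            (PySem.List.pyRange 0 k 1).foldl
              (fun temp j => temp ++ [PySem.List.pyGetD cs (i + j) ' ']) []
          let t := String.ofList temp
          if t ∈ st.1 then st else (st.1 ++ [t], st.2 ++ [i])) st).2.length := by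
  induction l generalizing st d with
  | nil => exact ⟨hitems, hlen⟩
  | cons i rest ih =>
    simp only [List.foldl_cons]
    have hi := hmem i (by simp)
    have hkey : String.ofList ((PySem.List.pyRange 0 k 1).foldl
        (fun temp j => temp ++ [PySem.List.pyGetD cs (i + j) ' ']) [])
        = String.ofList (PySem.List.slice cs (some i) (some (i + k))) := by
      rw [window_eq cs i k hi.1 hk hi.2]
    have hkeys : d.keys = st.1 := by
      show d.items.map Prod.fst = st.1
      rw [hitems, List.map_fst_zip (le_of_eq hlen)]
    by_cases hmemk : String.ofList ((PySem.List.pyRange 0 k 1).foldl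
        (fun temp j => temp ++ [PySem.List.pyGetD cs (i + j) ' ']) []) ∈ st.1
    · have hcont : d.contains (String.ofList (PySem.List.slice cs (some i) (some (i + k)))) = true := by
        rw [PySem.Dict.contains_iff_mem_keys, hkeys, ← hkey]; exact hmemk
      rw [PySem.Dict.setdefault_of_contains _ _ hcont]
      simp only [hmemk, if_pos]
      exact ih (fun x hx => hmem x (by simp [hx])) st d hitems hlen
    · have hcont : d.contains (String.ofList (PySem.List.slice cs (some i) (some (i + k)))) = false := by
        rw [← Bool.not_eq_true, PySem.Dict.contains_iff_mem_keys, hkeys, ← hkey]; exact hmemk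
      rw [PySem.Dict.setdefault_of_not_contains _ _ hcont]
      simp only [hmemk, if_false]
      refine ih (fun x hx => hmem x (by simp [hx])) _ _ ?_ (by simp [hlen])
      rw [PySem.Dict.items_insert_of_not_contains _ _ hcont, hitems, ← hkey]
      simp [List.zip_append hlen]


lemma buildKmer_eq_alt (k : Int) (s : String) : buildKmer k s = buildKmer_alt k s := by
  by_cases hk : k > 0
  · simp only [buildKmer, buildKmer_alt, if_pos hk]
    have hmem : ∀ i ∈ PySem.List.pyRange 0 (PySem.Str.len s - k + 1) 1,
        0 ≤ i ∧ i + k ≤ (s.toList.length : Int) := by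
      intro i hi
      rw [PySem.List.mem_pyRange_one] at hi
      have := PySem.Str.len_eq s
      omega
    obtain ⟨hI, hL⟩ := sim' s.toList k hk _ hmem ([], []) PySem.Dict.empty rfl rfl
    set st := (PySem.List.pyRange 0 (PySem.Str.len s - k + 1) 1).foldl
      (fun st i =>
        let temp : List Char :=
          (PySem.List.pyRange 0 k 1).foldl
            (fun temp j => temp ++ [PySem.List.pyGetD s.toList (i + j) ' ']) []
        let t := String.ofList temp
        if t ∈ st.1 then st else (st.1 ++ [t], st.2 ++ [i])) ([], []) with hst
    set r := (PySem.List.pyRange 0 (PySem.Str.len s - k + 1) 1).foldl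
      (fun d i => d.setdefault (String.ofList (PySem.List.slice s.toList (some i) (some (i + k)))) i)
      PySem.Dict.empty with hr
    have hkeys : r.keys = st.1 := by
      show r.items.map Prod.fst = st.1
      rw [hI, List.map_fst_zip (le_of_eq hL)]
    have hvals : r.values = st.2 := by
      show r.items.map Prod.snd = st.2
      rw [hI, List.map_snd_zip (ge_of_eq hL)]
    exact Prod.ext hkeys.symm hvals.symm
  · simp [buildKmer, buildKmer_alt, if_neg hk, PySem.Dict.keys, PySem.Dict.values, PySem.Dict.empty]


-- ===== VERDICT (by name: the statement is the Claim_ definition above) =====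
theorem buildKmer_spec : Claim_equal_buildKmer := by
  intro k s _
  unfold Spec_buildKmer
  exact buildKmer_eq_alt k s
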